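-- pv_equiv track=rewrite | github.com/sqj0213/watchd | statsd-client/udp_test.py | interKey
-- ===== SOURCE A (Python) =====
-- apiKeyList = ["_","_2_","_2_statuses_count_json","_2_statuses_count_sp_json","_2_statuses_friends_timeline_ids_json","_2_statuses_friends_timeline_json","_2_statuses_mix_user_timeline_json","_2_statuses_repost_json"]
--
-- def interKey(_idc,_ip):
--     requstList = []
--     for _api in apiKeyList:
--         string_byhost = ""
--         #byhost
--         byhost_total_hits = "%s.byhost.%s.total.%s.hits:1|c\n"%(_idc,_ip,_api)
--         byhost_total_hits = byhost_total_hits*7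
--         byhost_http_2xx = "%s.byhost.%s.http_2xx.%s.hits:1|c\n"%(_idc,_ip,_api)
--         byhost_http_2xx = byhost_http_2xx*5
--
--         byhost_http_5xx = "%s.byhost.%s.http_5xx.%s.hits:1|c\n"%(_idc,_ip,_api)
--         byhost_http_4xx = "%s.byhost.%s.http_4xx.%s.hits:1|c\n"%(_idc,_ip,_api)
--         byhost_less_500ms = "%s.byhost.%s.http_2xx.%s.less_500ms:1|c\n"%(_idc,_ip,_api)
--         byhost_less_1s = "%s.byhost.%s.http_2xx.%s.less_1s:1|c\n"%(_idc,_ip,_api)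
--         byhost_less_2s = "%s.byhost.%s.http_2xx.%s.less_2s:1|c\n"%(_idc,_ip,_api)
--         byhost_less_4s = "%s.byhost.%s.http_2xx.%s.less_4s:1|c\n"%(_idc,_ip,_api)
--         byhost_over_4s = "%s.byhost.%s.http_2xx.%s.over_4s:1|c\n"%(_idc,_ip,_api)
--         string_byhost = byhost_total_hits + byhost_http_2xx + byhost_http_5xx + byhost_http_4xx + byhost_less_500ms + byhost_less_1s + byhost_less_2s +byhost_less_4s + byhost_over_4s
--         requstList.append(string_byhost)
--
--         string_byhost1 = ""
--         #not byhost  #openapi.blossomin_yf.http_2xx._2_remind_set_count_json.hits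
--         total_hits = "%s.total.%s.hits:1|c\n"%(_idc,_api)
--         total_hits = total_hits*7
--
--         http_2xx = "%s.http_2xx.%s.hits:1|c\n"%(_idc,_api)
--         http_2xx = http_2xx*5
--
--         http_5xx = "%s.http_5xx.%s.hits:1|c\n"%(_idc,_api)
--         http_4xx = "%s.http_4xx.%s.hits:1|c\n"%(_idc,_api)
--         less_500ms = "%s.http_2xx.%s.less_500ms:1|c\n"%(_idc,_api)
--         less_1s = "%s.http_2xx.%s.less_1s:1|c\n"%(_idc,_api)
--         less_2s = "%s.http_2xx.%s.less_2s:1|c\n"%(_idc,_api)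
--         less_4s = "%s.http_2xx.%s.less_4s:1|c\n"%(_idc,_api)
--         over_4s = "%s.http_2xx.%s.over_4s:1|c\n"%(_idc,_api)
--
--         string_byhost1 =  total_hits + http_2xx  + http_5xx + http_4xx + less_500ms + less_1s + less_2s + less_4s + over_4s
--         requstList.append(string_byhost1)
--     return requstList
-- ===== SOURCE B (Python) =====
-- apiKeyList = ["_","_2_","_2_statuses_count_json","_2_statuses_count_sp_json","_2_statuses_friends_timeline_ids_json","_2_statuses_friends_timeline_json","_2_statuses_mix_user_timeline_json","_2_statuses_repost_json"]
--
-- # shared spec table: (format for the middle part, repeat count)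
-- _SPEC = [
--     ("total.%s.hits", 7),
--     ("http_2xx.%s.hits", 5),
--     ("http_5xx.%s.hits", 1),
--     ("http_4xx.%s.hits", 1),
--     ("http_2xx.%s.less_500ms", 1),
--     ("http_2xx.%s.less_1s", 1),
--     ("http_2xx.%s.less_2s", 1),
--     ("http_2xx.%s.less_4s", 1),
--     ("http_2xx.%s.over_4s", 1),
-- ]
--
-- def interKey(_idc, _ip):
--     out = []
--     for _api in apiKeyList:
--         for prefix in ("%s.byhost.%s." % (_idc, _ip), "%s." % _idc):
--             out.append("".join((prefix + fmt % _api + ":1|c\n") * cnt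
--                                for fmt, cnt in _SPEC))
--     return out
-- ===== Notes on version B (the rewrite author's own statement) =====
-- stated objective: simpler
-- what changed: Replaces the fully unrolled per-metric string variables (nine named lines duplicated for the byhost and plain variants) with one shared (format, repeat-count) table and a prefix loop that generates both variants.
import Mathlib
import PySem

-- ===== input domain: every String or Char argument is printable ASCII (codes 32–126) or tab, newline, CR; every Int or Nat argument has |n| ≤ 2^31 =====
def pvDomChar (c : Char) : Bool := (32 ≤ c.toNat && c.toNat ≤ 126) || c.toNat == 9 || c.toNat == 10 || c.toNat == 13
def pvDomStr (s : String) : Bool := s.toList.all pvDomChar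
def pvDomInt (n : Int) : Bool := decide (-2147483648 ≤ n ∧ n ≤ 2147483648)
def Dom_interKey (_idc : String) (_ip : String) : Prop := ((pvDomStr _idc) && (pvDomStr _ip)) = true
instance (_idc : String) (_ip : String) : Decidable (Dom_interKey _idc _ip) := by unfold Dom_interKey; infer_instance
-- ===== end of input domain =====

-- B replaces A's eighteen unrolled per-metric string variables with one shared
-- (format, repeat-count) table and a prefix loop; objective: simpler.

-- Python's  s * n  on a string (n-fold repetition)
def strRepeat (s : String) (n : Nat) : String :=
  match n with
  | 0 => ""
  | n + 1 => s ++ strRepeat s n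

def apiKeyList : List String :=
  ["_","_2_","_2_statuses_count_json","_2_statuses_count_sp_json",
   "_2_statuses_friends_timeline_ids_json","_2_statuses_friends_timeline_json",
   "_2_statuses_mix_user_timeline_json","_2_statuses_repost_json"]

-- ===== PORT A =====
-- literal transliteration: the for-loop is a foldl appending two strings per api
def interKeyBody (_idc _ip _api : String) : List String :=
  let byhost_total_hits := strRepeat (_idc ++ ".byhost." ++ _ip ++ ".total." ++ _api ++ ".hits:1|c\n") 7
  let byhost_http_2xx := strRepeat (_idc ++ ".byhost." ++ _ip ++ ".http_2xx." ++ _api ++ ".hits:1|c\n") 5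
  let byhost_http_5xx := _idc ++ ".byhost." ++ _ip ++ ".http_5xx." ++ _api ++ ".hits:1|c\n"
  let byhost_http_4xx := _idc ++ ".byhost." ++ _ip ++ ".http_4xx." ++ _api ++ ".hits:1|c\n"
  let byhost_less_500ms := _idc ++ ".byhost." ++ _ip ++ ".http_2xx." ++ _api ++ ".less_500ms:1|c\n"
  let byhost_less_1s := _idc ++ ".byhost." ++ _ip ++ ".http_2xx." ++ _api ++ ".less_1s:1|c\n"
  let byhost_less_2s := _idc ++ ".byhost." ++ _ip ++ ".http_2xx." ++ _api ++ ".less_2s:1|c\n"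
  let byhost_less_4s := _idc ++ ".byhost." ++ _ip ++ ".http_2xx." ++ _api ++ ".less_4s:1|c\n"
  let byhost_over_4s := _idc ++ ".byhost." ++ _ip ++ ".http_2xx." ++ _api ++ ".over_4s:1|c\n"
  let string_byhost := byhost_total_hits ++ byhost_http_2xx ++ byhost_http_5xx ++ byhost_http_4xx ++
    byhost_less_500ms ++ byhost_less_1s ++ byhost_less_2s ++ byhost_less_4s ++ byhost_over_4s
  let total_hits := strRepeat (_idc ++ ".total." ++ _api ++ ".hits:1|c\n") 7
  let http_2xx := strRepeat (_idc ++ ".http_2xx." ++ _api ++ ".hits:1|c\n") 5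
  let http_5xx := _idc ++ ".http_5xx." ++ _api ++ ".hits:1|c\n"
  let http_4xx := _idc ++ ".http_4xx." ++ _api ++ ".hits:1|c\n"
  let less_500ms := _idc ++ ".http_2xx." ++ _api ++ ".less_500ms:1|c\n"
  let less_1s := _idc ++ ".http_2xx." ++ _api ++ ".less_1s:1|c\n"
  let less_2s := _idc ++ ".http_2xx." ++ _api ++ ".less_2s:1|c\n"
  let less_4s := _idc ++ ".http_2xx." ++ _api ++ ".less_4s:1|c\n"
  let over_4s := _idc ++ ".http_2xx." ++ _api ++ ".over_4s:1|c\n"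
  let string_byhost1 := total_hits ++ http_2xx ++ http_5xx ++ http_4xx ++
    less_500ms ++ less_1s ++ less_2s ++ less_4s ++ over_4s
  [string_byhost, string_byhost1]

def interKey (_idc : String) (_ip : String) : List String :=
  apiKeyList.foldl (fun requstList _api => requstList ++ interKeyBody _idc _ip _api) []

-- ===== PORT B =====
-- the %-format "pre%spost" is represented as the pair (pre, post)
def specTable : List ((String × String) × Nat) :=
  [(("total.", ".hits"), 7),
   (("http_2xx.", ".hits"), 5),
   (("http_5xx.", ".hits"), 1),
   (("http_4xx.", ".hits"), 1),
   (("http_2xx.", ".less_500ms"), 1),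
   (("http_2xx.", ".less_1s"), 1),
   (("http_2xx.", ".less_2s"), 1),
   (("http_2xx.", ".less_4s"), 1),
   (("http_2xx.", ".over_4s"), 1)]

def interKey_alt (_idc : String) (_ip : String) : List String :=
  apiKeyList.flatMap (fun _api =>
    [_idc ++ ".byhost." ++ _ip ++ ".", _idc ++ "."].map (fun prefx =>
      String.join (specTable.map (fun fc =>
        strRepeat (prefx ++ (fc.1.1 ++ _api ++ fc.1.2) ++ ":1|c\n") fc.2))))

-- ===== PRECONDITION & SPEC =====
def Spec_interKey (_idc : String) (_ip : String) (out : List String) : Prop := out = interKey_alt _idc _ip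
instance (_idc : String) (_ip : String) (out : List String) : Decidable (Spec_interKey _idc _ip out) := by unfold Spec_interKey; infer_instance

-- ===== CLAIM (what is proved, stated in full; the proofs are below) =====
def Claim_equal_interKey : Prop := ∀ (_idc : String) (_ip : String), Dom_interKey _idc _ip → Spec_interKey _idc _ip (interKey _idc _ip)

-- ===== LEMMAS AND PROOFS =====
set_option maxRecDepth 4000 in
theorem body_eq (idc ip api : String) :
    interKeyBody idc ip api =
      [idc ++ ".byhost." ++ ip ++ ".", idc ++ "."].map (fun prefx =>
        String.join (specTable.map (fun fc =>
          strRepeat (prefx ++ (fc.1.1 ++ api ++ fc.1.2) ++ ":1|c\n") fc.2))) := by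
  simp only [interKeyBody, specTable, List.map, String.join, List.foldl, strRepeat,
    String.append_assoc, String.append_empty]
  rfl

-- ===== VERDICT (by name: the statement is the Claim_ definition above) =====
theorem interKey_spec : Claim_equal_interKey := by
  intro idc ip _
  unfold Spec_interKey interKey interKey_alt apiKeyList
  simp only [List.foldl, List.flatMap, List.map, List.flatten, body_eq, List.map]
  simp
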